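-- pv_equiv track=rewrite | github.com/HITOfficial/College | WDI/Kartkówki Kolosy Egzaminy/Kolosy/Kolokwium I 20192020.py | count_finded_pows
-- ===== SOURCE A (Python) =====
-- def pows_of_number(n):
--     for i in range(1,1000): # sprawdzam od n żeby zaoszczędzic trochę liczenia do 1000
--         for power in range(2,11): # sprawdza od 2 do 10 potęgi żeby nie mulić programu
--             if i ** power > n:
--                 break
--             elif i ** power == n:
--                 return True # jesli znajdzie taką potęge to kończy działanie
--
--     return False # inaczej nie znalazło takiej potęgi
--
-- def count_finded_pows(list_to_search):
--     count_all_elements = 0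
--     count_pows = 0
--
--     for i in range(len(list_to_search)):
--         for j in range(len(list_to_search[i])): # liczę czy dla każdej liczby z listy znalazło potęgę
--             count_all_elements += 1
--             if pows_of_number(list_to_search[i][j]):
--                 count_pows += 1
--
--     if count_all_elements == count_pows:
--         return True
--
--     return False
-- ===== SOURCE B (Python) =====
-- def _is_pow(n):
--     # root extraction by binary search on the base, per exponent
--     for p in range(2, 11):
--         lo, hi = 1, 999
--         while lo <= hi:
--             mid = (lo + hi) // 2
--             v = mid ** p
--             if v == n:
--                 return True
--             if v < n:
--                 lo = mid + 1
--             else: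
--                 hi = mid - 1
--     return False
--
-- def count_finded_pows(list_to_search):
--     return all(_is_pow(x) for row in list_to_search for x in row)
-- ===== Notes on version B (the rewrite author's own statement) =====
-- stated objective: faster
-- what changed: The per-element test inverts A's linear scan over all bases 1..999 (inner exponent loop with break) into a per-exponent binary search for an integer root in [1,999], and A's counter-pair comparison becomes an all() over the elements.
import Mathlib
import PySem

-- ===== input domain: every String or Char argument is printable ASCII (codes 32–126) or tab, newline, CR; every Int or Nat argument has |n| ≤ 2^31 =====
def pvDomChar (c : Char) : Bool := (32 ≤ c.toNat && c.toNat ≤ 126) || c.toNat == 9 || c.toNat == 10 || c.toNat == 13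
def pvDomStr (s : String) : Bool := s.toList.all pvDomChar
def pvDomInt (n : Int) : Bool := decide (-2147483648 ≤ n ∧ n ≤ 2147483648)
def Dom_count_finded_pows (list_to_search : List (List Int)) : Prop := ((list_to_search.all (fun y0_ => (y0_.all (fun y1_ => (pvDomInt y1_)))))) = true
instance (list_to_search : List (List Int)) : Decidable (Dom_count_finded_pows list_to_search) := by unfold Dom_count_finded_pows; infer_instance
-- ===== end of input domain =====

-- B replaces A's base-by-base linear scan with a per-exponent binary search for the base
-- and an all() over the elements (alternative algorithm, same accepted set).

-- ===== PORT A =====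
-- inner 'for power in range(2,11)' loop of pows_of_number, with its break / early return
def pvInnerA (n i : Int) : List Int → Bool
  | [] => false
  | p :: ps =>
    if i ^ p.toNat > n then false            -- i ** power  (power ≥ 0 here; toNat is exact)
    else if i ^ p.toNat = n then true
    else pvInnerA n i ps

def pows_of_number (n : Int) : Bool :=
  (PySem.List.pyRange 1 1000 1).any (fun i => pvInnerA n i (PySem.List.pyRange 2 11 1))

def count_finded_pows (list_to_search : List (List Int)) : Bool :=
  -- counters (count_all_elements, count_pows) threaded through the two index loops
  let st : Int × Int :=
    (PySem.List.pyRange 0 (PySem.List.len list_to_search) 1).foldl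
      (fun acc i =>
        let row := PySem.List.pyGetD list_to_search i []
        (PySem.List.pyRange 0 (PySem.List.len row) 1).foldl
          (fun (acc : Int × Int) j =>
            let x := PySem.List.pyGetD row j 0
            (acc.1 + 1, if pows_of_number x then acc.2 + 1 else acc.2))
          acc)
      (0, 0)
  st.1 == st.2

-- ===== PORT B =====
-- binary search for a base c ∈ [lo, hi] with c ^ p = n (the while-loop of _is_pow)
def pvBsearch (n : Int) (p : Nat) (lo hi : Int) : Bool :=
  if h : lo ≤ hi then
    let mid := PySem.Int.floordiv (lo + hi) 2
    if mid ^ p = n then true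
    else if mid ^ p < n then pvBsearch n p (mid + 1) hi
    else pvBsearch n p lo (mid - 1)
  else false
termination_by (hi + 1 - lo).toNat
decreasing_by
  · have := PySem.Int.floordiv_two_mid_bounds h; omega
  · have := PySem.Int.floordiv_two_mid_bounds h; omega

def pvIsPow (n : Int) : Bool :=
  (List.range' 2 9).any (fun p => pvBsearch n p 1 999)

def count_finded_pows_alt (list_to_search : List (List Int)) : Bool :=
  list_to_search.all (fun row => row.all pvIsPow)

-- ===== PRECONDITION & SPEC =====
def Spec_count_finded_pows (list_to_search : List (List Int)) (out : Bool) : Prop := out = count_finded_pows_alt list_to_search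
instance (list_to_search : List (List Int)) (out : Bool) : Decidable (Spec_count_finded_pows list_to_search out) := by unfold Spec_count_finded_pows; infer_instance

-- ===== CLAIM (what is proved, stated in full; the proofs are below) =====
def Claim_equal_count_finded_pows : Prop := ∀ (list_to_search : List (List Int)), Dom_count_finded_pows list_to_search → Spec_count_finded_pows list_to_search (count_finded_pows list_to_search)

-- ===== LEMMAS AND PROOFS =====

-- A's inner loop over an ascending list of nonnegative exponents finds exactly an exact power
theorem pvInnerA_iff (n i : Int) (hi : 1 ≤ i) (ps : List Int)
    (hs : ps.Pairwise (· ≤ ·)) (h0 : ∀ p ∈ ps, 0 ≤ p) :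
    pvInnerA n i ps = true ↔ ∃ p ∈ ps, i ^ p.toNat = n := by
  induction ps with
  | nil => simp [pvInnerA]
  | cons p ps ih =>
    rw [List.pairwise_cons] at hs
    simp only [pvInnerA]
    split_ifs with hgt heq
    · simp only [false_iff]
      rintro ⟨q, hq, hqe⟩
      rcases List.mem_cons.mp hq with rfl | hq'
      · omega
      · have hpq : p ≤ q := hs.1 q hq'
        have : i ^ p.toNat ≤ i ^ q.toNat := pow_le_pow_right₀ hi (by omega)
        omega
    · simp only [true_iff]
      exact ⟨p, List.mem_cons_self, heq⟩
    · rw [ih hs.2 (fun q hq => h0 q (List.mem_cons_of_mem _ hq))]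
      constructor
      · rintro ⟨q, hq, hqe⟩; exact ⟨q, List.mem_cons_of_mem _ hq, hqe⟩
      · rintro ⟨q, hq, hqe⟩
        rcases List.mem_cons.mp hq with rfl | hq'
        · omega
        · exact ⟨q, hq', hqe⟩

-- binary-search correctness: on [lo, hi] with 1 ≤ lo, it finds a base iff one exists
theorem pvBsearch_iff (n : Int) (p : Nat) (lo hi : Int) (hlo : 1 ≤ lo) :
    pvBsearch n p lo hi = true ↔ ∃ c, lo ≤ c ∧ c ≤ hi ∧ c ^ p = n := by
  fun_induction pvBsearch n p lo hi with
  | case1 lo hi h mid heq =>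
    simp only [true_iff]
    have := PySem.Int.floordiv_two_mid_bounds h
    exact ⟨mid, this.1, this.2, heq⟩
  | case2 lo hi h mid heq hlt ih =>
    have hb := PySem.Int.floordiv_two_mid_bounds h
    rw [ih (by omega)]
    constructor
    · rintro ⟨c, h1, h2, h3⟩; exact ⟨c, by omega, h2, h3⟩
    · rintro ⟨c, h1, h2, h3⟩
      refine ⟨c, ?_, h2, h3⟩
      by_contra hc
      have : c ^ p ≤ mid ^ p := pow_le_pow_left₀ (by omega) (by omega) p
      omega
  | case3 lo hi h mid heq hlt ih =>
    have hb := PySem.Int.floordiv_two_mid_bounds h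
    rw [ih hlo]
    constructor
    · rintro ⟨c, h1, h2, h3⟩; exact ⟨c, h1, by omega, h3⟩
    · rintro ⟨c, h1, h2, h3⟩
      refine ⟨c, h1, ?_, h3⟩
      by_contra hc
      have : mid ^ p ≤ c ^ p := pow_le_pow_left₀ (by omega) (by omega) p
      omega
  | case4 lo hi h =>
    simp only [Bool.false_eq_true, false_iff]
    rintro ⟨c, h1, h2, _⟩; omega

-- the two element tests agree
theorem pows_eq_isPow (n : Int) : pows_of_number n = pvIsPow n := by
  have h : pows_of_number n = true ↔ pvIsPow n = true := by
    unfold pows_of_number pvIsPow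
    simp only [List.any_eq_true]
    constructor
    · rintro ⟨i, hi, hinner⟩
      rw [PySem.List.mem_pyRange_one] at hi
      rw [pvInnerA_iff n i (by omega) (PySem.List.pyRange 2 11)
          ((PySem.List.pairwise_lt_pyRange_one 2 11).imp le_of_lt)
          (fun p hp => by rw [PySem.List.mem_pyRange_one] at hp; omega)] at hinner
      obtain ⟨p, hp, hpe⟩ := hinner
      rw [PySem.List.mem_pyRange_one] at hp
      refine ⟨p.toNat, by rw [List.mem_range'_1]; omega, ?_⟩
      rw [pvBsearch_iff n p.toNat 1 999 le_rfl]
      exact ⟨i, by omega, by omega, hpe⟩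
    · rintro ⟨p, hp, hb⟩
      rw [List.mem_range'_1] at hp
      rw [pvBsearch_iff n p 1 999 le_rfl] at hb
      obtain ⟨c, hc1, hc2, hce⟩ := hb
      refine ⟨c, by rw [PySem.List.mem_pyRange_one]; omega, ?_⟩
      rw [pvInnerA_iff n c hc1 (PySem.List.pyRange 2 11)
          ((PySem.List.pairwise_lt_pyRange_one 2 11).imp le_of_lt)
          (fun q hq => by rw [PySem.List.mem_pyRange_one] at hq; omega)]
      refine ⟨(p : Int), by rw [PySem.List.mem_pyRange_one]; omega, ?_⟩
      simpa using hce
  exact Bool.coe_iff_coe.mp h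

-- the counter pair after folding a list of elements: total length and countP
theorem pvFold_counts (f : Int → Bool) (xs : List Int) (a b : Int) :
    xs.foldl (fun (acc : Int × Int) x => (acc.1 + 1, if f x then acc.2 + 1 else acc.2)) (a, b)
      = (a + xs.length, b + xs.countP f) := by
  induction xs generalizing a b with
  | nil => simp
  | cons x xs ih =>
    simp only [List.foldl_cons, ih, List.countP_cons, List.length_cons, Prod.mk.injEq]
    split_ifs <;> exact ⟨by push_cast; ring, by push_cast; ring⟩

theorem count_finded_pows_eq_alt (l : List (List Int)) :
    count_finded_pows l = count_finded_pows_alt l := by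
  have h : count_finded_pows l = true ↔ count_finded_pows_alt l = true := by
    simp only [count_finded_pows, PySem.List.len_eq]
    rw [PySem.List.foldl_pyRange_zero_pyGetD' l []
        (fun (acc : Int × Int) row =>
          List.foldl (fun (acc : Int × Int) j =>
            (acc.1 + 1, if pows_of_number (PySem.List.pyGetD row j 0) then acc.2 + 1 else acc.2))
            acc (PySem.List.pyRange 0 (row.length : Int) 1)) (0, 0)]
    rw [PySem.List.foldl_congr_mem l
        (fun (acc : Int × Int) row =>
          List.foldl (fun (acc : Int × Int) j =>
            (acc.1 + 1, if pows_of_number (PySem.List.pyGetD row j 0) then acc.2 + 1 else acc.2))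
            acc (PySem.List.pyRange 0 (row.length : Int)))
        (fun (acc : Int × Int) row =>
          List.foldl (fun (acc : Int × Int) x =>
            (acc.1 + 1, if pows_of_number x then acc.2 + 1 else acc.2)) acc row)
        (0, 0)
        (fun acc row _ => PySem.List.foldl_pyRange_zero_pyGetD' row 0
          (fun (acc : Int × Int) x =>
            (acc.1 + 1, if pows_of_number x then acc.2 + 1 else acc.2)) acc)]
    rw [← List.foldl_flatten, pvFold_counts pows_of_number l.flatten 0 0]
    simp only [zero_add, beq_iff_eq, Nat.cast_inj, count_finded_pows_alt,
      List.all_eq_true]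
    rw [eq_comm, List.countP_eq_length]
    constructor
    · intro h row hrow x hx
      rw [← pows_eq_isPow]
      exact h x (List.mem_flatten.mpr ⟨row, hrow, hx⟩)
    · intro h x hx
      obtain ⟨row, hrow, hxr⟩ := List.mem_flatten.mp hx
      rw [pows_eq_isPow]
      exact h row hrow x hxr
  exact Bool.coe_iff_coe.mp h

-- ===== VERDICT (by name: the statement is the Claim_ definition above) =====
theorem count_finded_pows_spec : Claim_equal_count_finded_pows := by
  intro l _
  exact count_finded_pows_eq_alt l
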